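-- pv_equiv track=rewrite | github.com/aws-solutions/cloud-migration-factory-on-aws | source/backend/lambda_layers/lambda_layer_items/python/query_conditions.py | parse_outcomes
-- ===== SOURCE A (Python) =====
-- def parse_outcomes(outcomes):
--     return_required = False
--     return_hidden = False
--
--     for outcome in outcomes:
--         if outcome == 'required':
--             return_required = True
--         elif outcome == 'not_required':
--             return_required = False
--         elif outcome == 'hidden':
--             return_hidden = True
--         elif outcome == 'not_hidden':
--             return_hidden = False
--
--     return return_required, return_hidden
-- ===== SOURCE B (Python) =====
-- def parse_outcomes(outcomes):
--     items = list(outcomes)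
--     req = [o for o in items if o in ('required', 'not_required')]
--     hid = [o for o in items if o in ('hidden', 'not_hidden')]
--     return_required = (req[-1] == 'required') if req else False
--     return_hidden = (hid[-1] == 'hidden') if hid else False
--     return return_required, return_hidden
-- ===== Notes on version B (the rewrite author's own statement) =====
-- stated objective: simpler
-- what changed: Replaced the stateful single forward pass with two independent filters (required-state and hidden-state sublists) whose last element decides each boolean.
import Mathlib
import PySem

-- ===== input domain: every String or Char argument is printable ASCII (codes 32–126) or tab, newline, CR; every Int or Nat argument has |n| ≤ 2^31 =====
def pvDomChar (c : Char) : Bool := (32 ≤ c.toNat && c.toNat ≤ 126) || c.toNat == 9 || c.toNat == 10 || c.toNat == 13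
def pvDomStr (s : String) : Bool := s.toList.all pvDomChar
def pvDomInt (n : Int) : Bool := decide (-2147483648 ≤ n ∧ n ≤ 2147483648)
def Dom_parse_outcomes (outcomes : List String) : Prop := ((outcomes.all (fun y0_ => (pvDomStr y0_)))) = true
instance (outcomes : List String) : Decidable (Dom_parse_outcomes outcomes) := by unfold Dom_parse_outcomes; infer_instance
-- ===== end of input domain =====

-- B replaces A's stateful single pass by two independent filters whose last element decides each flag (objective: simpler decomposition, same cost).

-- ===== PORT A =====
def parse_outcomes (outcomes : List String) : Bool × Bool :=
  outcomes.foldl (fun s outcome =>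
    if outcome == "required" then (true, s.2)
    else if outcome == "not_required" then (false, s.2)
    else if outcome == "hidden" then (s.1, true)
    else if outcome == "not_hidden" then (s.1, false)
    else s) (false, false)

-- ===== PORT B =====
def parse_outcomes_alt (outcomes : List String) : Bool × Bool :=
  let req := outcomes.filter (fun o => o == "required" || o == "not_required")
  let hid := outcomes.filter (fun o => o == "hidden" || o == "not_hidden")
  ((match req.getLast? with | some o => o == "required" | none => false),
   (match hid.getLast? with | some o => o == "hidden" | none => false))

-- ===== PRECONDITION & SPEC =====
def Spec_parse_outcomes (outcomes : List String) (out : Bool × Bool) : Prop := out = parse_outcomes_alt outcomes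
instance (outcomes : List String) (out : Bool × Bool) : Decidable (Spec_parse_outcomes outcomes out) := by unfold Spec_parse_outcomes; infer_instance

-- ===== CLAIM (what is proved, stated in full; the proofs are below) =====
def Claim_equal_parse_outcomes : Prop := ∀ (outcomes : List String), Dom_parse_outcomes outcomes → Spec_parse_outcomes outcomes (parse_outcomes outcomes)

-- ===== LEMMAS AND PROOFS =====
theorem parse_outcomes_eq_alt (outcomes : List String) :
    parse_outcomes outcomes = parse_outcomes_alt outcomes := by
  induction outcomes using List.reverseRecOn with
  | nil => rfl
  | append_singleton l x ih =>
    simp only [parse_outcomes, List.foldl_append, List.foldl_cons, List.foldl_nil] at *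
    simp only [parse_outcomes_alt, List.filter_append, List.filter_cons, List.filter_nil] at *
    by_cases h1 : x = "required" <;> by_cases h2 : x = "not_required" <;>
      by_cases h3 : x = "hidden" <;> by_cases h4 : x = "not_hidden" <;>
      simp_all [List.getLast?_append]

-- ===== VERDICT (by name: the statement is the Claim_ definition above) =====
theorem parse_outcomes_spec : Claim_equal_parse_outcomes := by
  intro outcomes _
  exact parse_outcomes_eq_alt outcomes
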